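-- pv_equiv track=rewrite | github.com/kolko/algorithms | timsort/timsort.py | make_run_list
-- ===== SOURCE A (Python) =====
-- from itertools import takewhile
--
-- def make_run_list(array, array_len, minrun):
--     if array_len == 0:
--         yield 0, 0
--         return
--     if array_len == 1:
--         yield 0, 1
--         return
--     position = 0
--     while position < array_len-1:
--         if position == array_len-1:
--             #последний элемент
--             yield position, 1
--         if array[position] <= array[position+1]:
--             takewhile_lambda = lambda pos: array[pos[1]-1] <= array[pos[1]] or pos[0] < minrun-1
--         else:
--             takewhile_lambda = lambda pos: array[pos[1]-1] > array[pos[1]] or pos[0] < minrun-1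
--
--         run_length = len(list(takewhile(takewhile_lambda, list(enumerate(range(position+1, array_len)))))) + 1
--
--         yield position, run_length
--         position += run_length
-- ===== SOURCE B (Python) =====
-- def make_run_list(array, array_len, minrun):
--     # Two-stage algorithm: one backward pass precomputes, per direction, a
--     # break-successor table; each run is then emitted with a single table jump.
--     if array_len == 0:
--         yield 0, 0
--         return
--     if array_len == 1:
--         yield 0, 1
--         return
--     n = array_len
--     # asc_tbl[n - j] = smallest k in [j, n) with array[k-1] > array[k], else n
--     # desc_tbl[n - j] = smallest k in [j, n) with array[k-1] <= array[k], else n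
--     asc_tbl = [n]
--     desc_tbl = [n]
--     for j in range(n - 1, 0, -1):
--         asc_tbl.append(asc_tbl[-1] if array[j - 1] <= array[j] else j)
--         desc_tbl.append(desc_tbl[-1] if array[j - 1] > array[j] else j)
--     position = 0
--     while position < n - 1:
--         tbl = asc_tbl if array[position] <= array[position + 1] else desc_tbl
--         lo = position + minrun
--         if lo < position + 1:
--             lo = position + 1
--         if lo > n:
--             lo = n
--         end = tbl[n - lo]
--         yield position, end - position
--         position = end
-- ===== Notes on version B (the rewrite author's own statement) =====
-- stated objective: alternative
-- what changed: B is a two-stage algorithm: one backward pass precomputes a break-successor table per direction (first index k >= j where the direction breaks), then each run is emitted with a single table jump, instead of A's per-run takewhile over a freshly rebuilt list(enumerate(range(...))) of the remaining tail.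
import Mathlib
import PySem

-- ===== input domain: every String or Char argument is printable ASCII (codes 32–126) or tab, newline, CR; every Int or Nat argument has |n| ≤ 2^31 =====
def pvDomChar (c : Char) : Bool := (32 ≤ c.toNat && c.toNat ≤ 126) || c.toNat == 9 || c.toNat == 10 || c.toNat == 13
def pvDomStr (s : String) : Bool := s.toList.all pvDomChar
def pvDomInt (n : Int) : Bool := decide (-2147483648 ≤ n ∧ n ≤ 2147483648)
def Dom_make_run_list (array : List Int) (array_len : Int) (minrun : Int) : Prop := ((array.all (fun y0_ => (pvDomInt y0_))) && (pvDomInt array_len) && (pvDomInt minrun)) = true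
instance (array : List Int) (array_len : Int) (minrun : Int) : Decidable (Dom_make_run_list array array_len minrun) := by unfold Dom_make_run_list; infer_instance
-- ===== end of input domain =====

-- B replaces A's per-run takewhile over the re-enumerated tail by a two-stage
-- algorithm: one backward pass builds a break-successor table per direction,
-- then each run is emitted with a single table jump. Same yielded pairs.

-- ===== PORT A =====
-- the branch-chosen takewhile lambda of A (helper kept as a helper)
def twlA (array : List Int) (minrun : Int) (position : Int) : Int × Int → Bool :=
  if PySem.List.pyGetD array position 0 ≤ PySem.List.pyGetD array (position + 1) 0 then
    fun pos => decide (PySem.List.pyGetD array (pos.2 - 1) 0 ≤ PySem.List.pyGetD array pos.2 0) || decide (pos.1 < minrun - 1)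
  else
    fun pos => decide (PySem.List.pyGetD array (pos.2 - 1) 0 > PySem.List.pyGetD array pos.2 0) || decide (pos.1 < minrun - 1)

-- run_length = len(list(takewhile(takewhile_lambda, list(enumerate(range(position+1, array_len)))))) + 1
def runlenA (array : List Int) (array_len : Int) (minrun : Int) (position : Int) : Int :=
  (((PySem.List.enumerate (PySem.List.pyRange (position + 1) array_len 1) 0).takeWhile (twlA array minrun position)).length : Int) + 1

theorem runlenA_pos (array : List Int) (array_len minrun position : Int) :
    1 ≤ runlenA array array_len minrun position := by
  unfold runlenA; omega

-- the while loop of A (yields accumulated into the result list)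
def loopA (array : List Int) (array_len : Int) (minrun : Int) (position : Int) : List (Int × Int) :=
  if h : position < array_len - 1 then
    -- 'if position == array_len-1: yield position, 1' (unreachable under the loop guard, kept literally)
    (if position = array_len - 1 then [((position : Int), (1 : Int))] else []) ++
      ((position, runlenA array array_len minrun position) ::
        loopA array array_len minrun (position + runlenA array array_len minrun position))
  else []
  termination_by (array_len - 1 - position).toNat
  decreasing_by
    have := runlenA_pos array array_len minrun position
    omega

def make_run_list (array : List Int) (array_len : Int) (minrun : Int) : List (Int × Int) :=
  if array_len = 0 then [(0, 0)]
  else if array_len = 1 then [(0, 1)]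
  else loopA array array_len minrun 0

-- ===== PORT B =====
-- stage 1 of Source B: the backward 'for j in range(n-1, 0, -1)' loop appending to
-- both tables (asc_tbl, desc_tbl), started from ([n], [n])
def buildTblsB (array : List Int) (n : Int) : List Int × List Int :=
  (PySem.List.pyRange (n - 1) 0 (-1)).foldl
    (fun tb j =>
      (tb.1 ++ [if PySem.List.pyGetD array (j - 1) 0 ≤ PySem.List.pyGetD array j 0 then
                  PySem.List.pyGetD tb.1 (-1) 0 else j],
       tb.2 ++ [if PySem.List.pyGetD array (j - 1) 0 > PySem.List.pyGetD array j 0 then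
                  PySem.List.pyGetD tb.2 (-1) 0 else j]))
    ([n], [n])

-- stage 2 of Source B: the emitting while loop; fuel only makes the recursion
-- structurally total (the proof shows n.toNat steps always suffice)
def loopB (array : List Int) (n minrun : Int) (ascTbl descTbl : List Int) :
    Nat → Int → List (Int × Int)
  | 0, _ => []
  | fuel + 1, position =>
    if position < n - 1 then
      let tbl := if PySem.List.pyGetD array position 0 ≤ PySem.List.pyGetD array (position + 1) 0
                 then ascTbl else descTbl
      let lo0 := position + minrun
      let lo1 := if lo0 < position + 1 then position + 1 else lo0
      let lo := if lo1 > n then n else lo1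
      let endp := PySem.List.pyGetD tbl (n - lo) 0
      (position, endp - position) :: loopB array n minrun ascTbl descTbl fuel endp
    else []

def make_run_list_alt (array : List Int) (array_len : Int) (minrun : Int) : List (Int × Int) :=
  if array_len = 0 then [(0, 0)]
  else if array_len = 1 then [(0, 1)]
  else
    let tbls := buildTblsB array array_len
    loopB array array_len minrun tbls.1 tbls.2 array_len.toNat 0

-- ===== PRECONDITION & SPEC =====
-- Pre_ excludes exactly the inputs where Python A raises IndexError: array_len ≥ 2 together
-- with array_len > len(array) always reaches an out-of-range index.
def Pre_make_run_list (array : List Int) (array_len : Int) (minrun : Int) : Prop :=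
  array_len ≤ 1 ∨ array_len ≤ (array.length : Int)
instance (array : List Int) (array_len : Int) (minrun : Int) : Decidable (Pre_make_run_list array array_len minrun) := by unfold Pre_make_run_list; infer_instance
def pvWitness_make_run_list : List Int × Int × Int := ([3, 1, 2, 2, 0], 5, 2)

def Spec_make_run_list (array : List Int) (array_len : Int) (minrun : Int) (out : List (Int × Int)) : Prop := out = make_run_list_alt array array_len minrun
instance (array : List Int) (array_len : Int) (minrun : Int) (out : List (Int × Int)) : Decidable (Spec_make_run_list array array_len minrun out) := by unfold Spec_make_run_list; infer_instance

-- ===== CLAIM (what is proved, stated in full; the proofs are below) =====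
def Claim_equal_make_run_list : Prop := ∀ (array : List Int) (array_len : Int) (minrun : Int), Dom_make_run_list array array_len minrun → Pre_make_run_list array array_len minrun → Spec_make_run_list array array_len minrun (make_run_list array array_len minrun)

-- ===== LEMMAS AND PROOFS =====

-- first break at or after j relative to direction asc (proof-side specification
-- of both A's takewhile stopping point and B's table entries)
def fmSpec (array : List Int) (n : Int) (asc : Bool) (j : Int) : Int :=
  if h : j < n then
    if decide (PySem.List.pyGetD array (j - 1) 0 ≤ PySem.List.pyGetD array j 0) = asc then
      fmSpec array n asc (j + 1)
    else j
  else n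
  termination_by (n - j).toNat
  decreasing_by omega

theorem fmSpec_bounds (array : List Int) (n : Int) (asc : Bool) (j : Int) (hj : j ≤ n) :
    j ≤ fmSpec array n asc j ∧ fmSpec array n asc j ≤ n := by
  fun_induction fmSpec array n asc j with
  | case1 j h hc ih => have := ih (by omega); omega
  | case2 j h hc => omega
  | case3 j h => omega

theorem fmSpec_of_ge (array : List Int) (n : Int) (asc : Bool) (j : Int) (hj : n ≤ j) :
    fmSpec array n asc j = n := by
  rw [fmSpec, dif_neg (by omega)]

-- A's branch-chosen lambda, evaluated at a pair, as one boolean test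
theorem twlA_eval (array : List Int) (minrun position s v : Int) :
    twlA array minrun position (s, v) =
      (decide ((decide (PySem.List.pyGetD array (v - 1) 0 ≤ PySem.List.pyGetD array v 0) =
        decide (PySem.List.pyGetD array position 0 ≤ PySem.List.pyGetD array (position + 1) 0)) ∨ s < minrun - 1)) := by
  unfold twlA
  by_cases h1 : PySem.List.pyGetD array position 0 ≤ PySem.List.pyGetD array (position + 1) 0 <;>
    by_cases h2 : PySem.List.pyGetD array (v - 1) 0 ≤ PySem.List.pyGetD array v 0 <;>
      simp [h1, h2] <;> omega

-- A's takewhile stopping point is the first break at or after max(a, position+minrun)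
theorem tw_eq_fmSpec (array : List Int) (n minrun position : Int) :
    ∀ (fuel : Nat) (a s : Int), (n - a).toNat ≤ fuel → a = position + 1 + s → a ≤ n →
      a + (((PySem.List.enumerate (PySem.List.pyRange a n 1) s).takeWhile (twlA array minrun position)).length : Int) =
        fmSpec array n (decide (PySem.List.pyGetD array position 0 ≤ PySem.List.pyGetD array (position + 1) 0))
          (max a (position + minrun)) := by
  intro fuel
  induction fuel with
  | zero =>
    intro a s hfuel hs han
    have ha : a = n := by omega
    subst ha
    rw [PySem.List.pyRange_one_eq_nil le_rfl]
    rw [fmSpec, dif_neg (by omega)]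
    simp [PySem.List.enumerate]
  | succ fuel ih =>
    intro a s hfuel hs han
    by_cases hab : a < n
    · rw [PySem.List.pyRange_one_cons hab, PySem.List.enumerate_cons]
      by_cases hq : (decide (PySem.List.pyGetD array (a - 1) 0 ≤ PySem.List.pyGetD array a 0) =
          decide (PySem.List.pyGetD array position 0 ≤ PySem.List.pyGetD array (position + 1) 0)) ∨
          s < minrun - 1
      · have htw : twlA array minrun position (s, a) = true := by
          rw [twlA_eval]; exact decide_eq_true hq
        rw [List.takeWhile_cons_of_pos htw]
        have hrec := ih (a + 1) (s + 1) (by omega) (by omega) (by omega)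
        have hstep : fmSpec array n (decide (PySem.List.pyGetD array position 0 ≤ PySem.List.pyGetD array (position + 1) 0)) (max a (position + minrun)) =
            fmSpec array n (decide (PySem.List.pyGetD array position 0 ≤ PySem.List.pyGetD array (position + 1) 0)) (max (a + 1) (position + minrun)) := by
          by_cases hlo : a < position + minrun
          · congr 1; omega
          · have hmx : max a (position + minrun) = a := by omega
            have hmx1 : max (a + 1) (position + minrun) = a + 1 := by omega
            rw [hmx, hmx1, fmSpec, dif_pos hab]
            rcases hq with hmatch | hcnt
            · rw [if_pos hmatch]
            · omega
        rw [hstep, ← hrec]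
        simp only [List.length_cons]
        push_cast
        omega
      · have htw : ¬ twlA array minrun position (s, a) = true := by
          rw [twlA_eval]; simp only [decide_eq_true_eq]; exact hq
        rw [List.takeWhile_cons_of_neg htw]
        have hmx : max a (position + minrun) = a := by omega
        rw [hmx, fmSpec, dif_pos hab]
        rw [if_neg (fun hm => hq (Or.inl hm))]
        simp
    · have ha : a = n := by omega
      subst ha
      rw [PySem.List.pyRange_one_eq_nil le_rfl]
      rw [fmSpec, dif_neg (by omega)]
      simp [PySem.List.enumerate]

theorem runlenA_eq_fmSpec (array : List Int) (n minrun position : Int) (hpn : position + 1 ≤ n) :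
    position + runlenA array n minrun position =
      fmSpec array n (decide (PySem.List.pyGetD array position 0 ≤ PySem.List.pyGetD array (position + 1) 0))
        (max (position + 1) (position + minrun)) := by
  have := tw_eq_fmSpec array n minrun position (n - (position + 1)).toNat (position + 1) 0 (by omega) (by omega) hpn
  unfold runlenA
  omega

-- one generic step of B's table-building loop (flag true = asc_tbl, false = desc_tbl)
def tstep (array : List Int) (flag : Bool) (acc : List Int) (j : Int) : List Int :=
  acc ++ [if decide (PySem.List.pyGetD array (j - 1) 0 ≤ PySem.List.pyGetD array j 0) = flag then
            PySem.List.pyGetD acc (-1) 0 else j]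

-- invariant of the backward pass: the table built down to b is the map of fmSpec
-- over [n, n-1, …, b+1]
theorem tbl_invariant (array : List Int) (n : Int) (flag : Bool) :
    ∀ (fuel : Nat) (a b : Int), (a - b).toNat ≤ fuel → 0 ≤ b → b ≤ a → a ≤ n - 1 →
      (PySem.List.pyRange a b (-1)).foldl (tstep array flag)
          ((PySem.List.pyRange n a (-1)).map (fmSpec array n flag)) =
        (PySem.List.pyRange n b (-1)).map (fmSpec array n flag) := by
  intro fuel
  induction fuel with
  | zero =>
    intro a b hfuel hb hba han
    have hab : a = b := by omega
    subst hab
    rw [PySem.List.pyRange_neg_one_eq_nil le_rfl]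
    simp
  | succ fuel ih =>
    intro a b hfuel hb hba han
    by_cases hba' : b < a
    · rw [PySem.List.pyRange_neg_one_cons hba']
      simp only [List.foldl_cons]
      have hsplit : PySem.List.pyRange n a (-1) = PySem.List.pyRange n (a + 1) (-1) ++ [a + 1] := by
        rw [PySem.List.pyRange_neg_one_eq_reverse, PySem.List.pyRange_neg_one_eq_reverse,
          PySem.List.pyRange_one_cons (by omega : a + 1 < n + 1)]
        simp
      have hstep : tstep array flag ((PySem.List.pyRange n a (-1)).map (fmSpec array n flag)) a =
          (PySem.List.pyRange n (a - 1) (-1)).map (fmSpec array n flag) := by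
        unfold tstep
        rw [hsplit]
        rw [List.map_append]
        simp only [List.map_cons, List.map_nil]
        rw [PySem.List.pyGetD_neg_one_append_singleton]
        have hsplit2 : PySem.List.pyRange n (a - 1) (-1) = PySem.List.pyRange n a (-1) ++ [a] := by
          rw [PySem.List.pyRange_neg_one_eq_reverse, PySem.List.pyRange_neg_one_eq_reverse,
            PySem.List.pyRange_one_cons (by omega : a - 1 + 1 < n + 1)]
          have : a - 1 + 1 = a := by omega
          simp [this]
        rw [hsplit2, List.map_append, hsplit, List.map_append]
        simp only [List.map_cons, List.map_nil, List.append_assoc, List.append_cancel_left_eq]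
        have hfa : fmSpec array n flag a =
            if decide (PySem.List.pyGetD array (a - 1) 0 ≤ PySem.List.pyGetD array a 0) = flag then
              fmSpec array n flag (a + 1) else a := by
          rw [fmSpec, dif_pos (by omega : a < n)]
        rw [hfa]
      rw [hstep]
      exact ih (a - 1) b (by omega) hb (by omega) (by omega)
    · have hab : a = b := by omega
      subst hab
      rw [PySem.List.pyRange_neg_one_eq_nil le_rfl]
      simp

-- the finished tables index as fmSpec: tbl[n - k] = fmSpec k for 1 ≤ k ≤ n
theorem tbl_lookup (array : List Int) (n : Int) (flag : Bool) (hn : 1 ≤ n) (k : Int)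
    (hk1 : 1 ≤ k) (hkn : k ≤ n) :
    PySem.List.pyGetD ((PySem.List.pyRange n 0 (-1)).map (fmSpec array n flag)) (n - k) 0 =
      fmSpec array n flag k := by
  rw [PySem.List.pyRange_neg_one, List.map_map]
  have hcast : (n - k : Int) = (((n - k).toNat : Nat) : Int) := by omega
  rw [hcast, PySem.List.pyGetD_natCast]
  rw [List.getD_eq_getElem _ _ (by simpa using by omega : (n - k).toNat < _)]
  simp only [List.getElem_map, List.getElem_range, Function.comp]
  congr 1
  omega

-- the two components of buildTblsB are the generic fold with flag = true / false
theorem buildTblsB_eq (array : List Int) (n : Int) (hn : 2 ≤ n) :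
    buildTblsB array n = ((PySem.List.pyRange n 0 (-1)).map (fmSpec array n true),
                          (PySem.List.pyRange n 0 (-1)).map (fmSpec array n false)) := by
  unfold buildTblsB
  have hfun : (fun (tb : List Int × List Int) (j : Int) =>
      (tb.1 ++ [if PySem.List.pyGetD array (j - 1) 0 ≤ PySem.List.pyGetD array j 0 then
                  PySem.List.pyGetD tb.1 (-1) 0 else j],
       tb.2 ++ [if PySem.List.pyGetD array (j - 1) 0 > PySem.List.pyGetD array j 0 then
                  PySem.List.pyGetD tb.2 (-1) 0 else j])) =
      (fun (tb : List Int × List Int) (j : Int) => (tstep array true tb.1 j, tstep array false tb.2 j)) := by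
    funext tb j
    unfold tstep
    by_cases h : PySem.List.pyGetD array (j - 1) 0 ≤ PySem.List.pyGetD array j 0 <;>
      simp [h, lt_iff_not_ge]
  rw [hfun, PySem.List.foldl_prod_mk (f := tstep array true) (g := tstep array false)]
  have hinit : ∀ flag, ([n] : List Int) = (PySem.List.pyRange n (n - 1) (-1)).map (fmSpec array n flag) := by
    intro flag
    rw [PySem.List.pyRange_neg_one_cons (by omega), PySem.List.pyRange_neg_one_eq_nil (by omega)]
    simp [fmSpec_of_ge array n flag n le_rfl]
  have h1 : (PySem.List.pyRange (n - 1) 0 (-1)).foldl (tstep array true) [n] =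
      (PySem.List.pyRange n 0 (-1)).map (fmSpec array n true) := by
    rw [hinit true]
    exact tbl_invariant array n true (n - 1).toNat (n - 1) 0 (by omega) (by omega) (by omega) le_rfl
  have h2 : (PySem.List.pyRange (n - 1) 0 (-1)).foldl (tstep array false) [n] =
      (PySem.List.pyRange n 0 (-1)).map (fmSpec array n false) := by
    rw [hinit false]
    exact tbl_invariant array n false (n - 1).toNat (n - 1) 0 (by omega) (by omega) (by omega) le_rfl
  rw [h1, h2]

-- A's loop equals B's table-jumping loop on the real tables
theorem loopA_eq_loopB (array : List Int) (n minrun : Int) (hn : 2 ≤ n) :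
    ∀ (fuel : Nat) (position : Int), 0 ≤ position → (n - 1 - position).toNat ≤ fuel →
      loopA array n minrun position =
        loopB array n minrun ((PySem.List.pyRange n 0 (-1)).map (fmSpec array n true))
          ((PySem.List.pyRange n 0 (-1)).map (fmSpec array n false)) fuel position := by
  intro fuel
  induction fuel with
  | zero =>
    intro position hpos hfuel
    rw [loopA, dif_neg (by omega)]
    rfl
  | succ fuel ih =>
    intro position hpos hfuel
    rw [loopA, loopB]
    by_cases hp : position < n - 1
    · rw [dif_pos hp, if_pos hp, if_neg (by omega)]
      simp only [List.nil_append]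
      have hlo : ∀ flag, (let lo0 := position + minrun
            let lo1 := if lo0 < position + 1 then position + 1 else lo0
            let lo := if lo1 > n then n else lo1
            PySem.List.pyGetD ((PySem.List.pyRange n 0 (-1)).map (fmSpec array n flag)) (n - lo) 0) =
          fmSpec array n flag (max (position + 1) (position + minrun)) := by
        intro flag
        simp only
        set lo1 := if position + minrun < position + 1 then position + 1 else position + minrun with hlo1
        have hlo1v : lo1 = max (position + 1) (position + minrun) := by
          rw [hlo1]; split_ifs <;> omega
        by_cases hbig : lo1 > n
        · rw [if_pos hbig]
          rw [tbl_lookup array n flag (by omega) n (by omega) le_rfl]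
          rw [fmSpec_of_ge array n flag n le_rfl, ← hlo1v,
            fmSpec_of_ge array n flag lo1 (by omega)]
        · rw [if_neg hbig]
          rw [tbl_lookup array n flag (by omega) lo1 (by omega) (by omega), hlo1v]
      have hend : position + runlenA array n minrun position =
          (if PySem.List.pyGetD array position 0 ≤ PySem.List.pyGetD array (position + 1) 0 then
             fmSpec array n true (max (position + 1) (position + minrun))
           else fmSpec array n false (max (position + 1) (position + minrun))) := by
        rw [runlenA_eq_fmSpec array n minrun position (by omega)]
        by_cases h : PySem.List.pyGetD array position 0 ≤ PySem.List.pyGetD array (position + 1) 0 <;>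
          simp [h]
      by_cases h : PySem.List.pyGetD array position 0 ≤ PySem.List.pyGetD array (position + 1) 0
      · simp only [if_pos h] at hend ⊢
        rw [hlo true, ← hend]
        have hlb : position + 1 ≤ position + runlenA array n minrun position :=
          by have := runlenA_pos array n minrun position; omega
        have hub : position + runlenA array n minrun position ≤ n := by
          rw [hend]
          by_cases hg : max (position + 1) (position + minrun) ≤ n
          · exact (fmSpec_bounds array n true _ hg).2
          · rw [fmSpec_of_ge array n true _ (by omega)]
        rw [← ih (position + runlenA array n minrun position) (by omega) (by omega)]
        have hx : position + runlenA array n minrun position - position =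
            runlenA array n minrun position := by omega
        rw [hx]
      · simp only [if_neg h] at hend ⊢
        rw [hlo false, ← hend]
        have hlb : position + 1 ≤ position + runlenA array n minrun position :=
          by have := runlenA_pos array n minrun position; omega
        have hub : position + runlenA array n minrun position ≤ n := by
          rw [hend]
          by_cases hg : max (position + 1) (position + minrun) ≤ n
          · exact (fmSpec_bounds array n false _ hg).2
          · rw [fmSpec_of_ge array n false _ (by omega)]
        rw [← ih (position + runlenA array n minrun position) (by omega) (by omega)]
        have hx : position + runlenA array n minrun position - position =
            runlenA array n minrun position := by omega
        rw [hx]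
    · rw [dif_neg hp, if_neg hp]

-- ===== VERDICT (by name: the statement is the Claim_ definition above) =====
theorem make_run_list_spec : Claim_equal_make_run_list := by
  intro array array_len minrun _ _
  unfold Spec_make_run_list make_run_list make_run_list_alt
  by_cases h0 : array_len = 0
  · simp [h0]
  · by_cases h1 : array_len = 1
    · simp [h1]
    · rw [if_neg h0, if_neg h1, if_neg h0, if_neg h1]
      by_cases hn : 2 ≤ array_len
      · simp only [buildTblsB_eq array array_len hn]
        exact loopA_eq_loopB array array_len minrun hn array_len.toNat 0 le_rfl (by omega)
      · -- array_len ≤ -1 or array_len < 0: both loops return [] immediately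
        rw [loopA, dif_neg (by omega)]
        have hz : array_len.toNat = 0 := by omega
        rw [hz]
        rfl
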